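-- pv_equiv track=rewrite | github.com/junsuk123/autodrone_ws | src/sjtu_drone-ros2/matlab/scripts/merge_autosim_results.py | parse_worker_run
-- ===== SOURCE A (Python) =====
-- from typing import Dict, List, Tuple
--
-- def parse_worker_run(path: str) -> Tuple[str, str]:
--     norm = path.replace("\\", "/")
--     parts = norm.split("/")
--     worker_id = ""
--     run_id = ""
--     for i, part in enumerate(parts):
--         if part.startswith("worker_"):
--             worker_id = part.split("_", 1)[1]
--             if i + 1 < len(parts):
--                 run_id = parts[i + 1]
--             break
--     return worker_id, run_id
-- ===== SOURCE B (Python) =====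
-- def parse_worker_run(path: str):
--     # Stream path components via str.partition instead of building the whole
--     # split list and index-scanning it with enumerate.
--     rest = path.replace("\\", "/")
--     while True:
--         part, sep, rest = rest.partition("/")
--         if part.startswith("worker_"):
--             return part[len("worker_"):], rest.partition("/")[0] if sep else ""
--         if not sep:
--             return "", ""
-- ===== Notes on version B (the rewrite author's own statement) =====
-- stated objective: alternative
-- what changed: B streams path components one at a time with str.partition and early returns, instead of building the full split list and scanning it with enumerate plus an index lookup for the following component.
import Mathlib
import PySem

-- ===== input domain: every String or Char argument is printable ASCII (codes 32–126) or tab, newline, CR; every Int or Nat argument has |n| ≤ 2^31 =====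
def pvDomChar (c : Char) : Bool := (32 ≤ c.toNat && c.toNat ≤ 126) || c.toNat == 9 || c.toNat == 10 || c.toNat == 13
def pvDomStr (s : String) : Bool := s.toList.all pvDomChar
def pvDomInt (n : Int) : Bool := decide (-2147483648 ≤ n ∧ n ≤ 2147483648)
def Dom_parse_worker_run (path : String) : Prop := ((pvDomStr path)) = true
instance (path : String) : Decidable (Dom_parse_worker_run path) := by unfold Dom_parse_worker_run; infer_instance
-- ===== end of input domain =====

-- B streams path components one at a time via str.partition with early returns,
-- instead of building the full split list and scanning it with enumerate (objective: alternative).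

-- ===== PORT A =====
-- the for-loop over enumerate(parts) with break, as a recursion over the enumerated pairs
def pvAGo (parts : List String) : List (Int × String) → String × String
  | [] => ("", "")
  | (i, part) :: tl =>
    if PySem.Str.startswith part "worker_" then
      -- part.split("_", 1)[1]; the [1] access cannot raise because part starts with "worker_"
      let worker_id := ((PySem.Str.splitMax? part "_" 1).getD []).getD 1 ""
      let run_id := if i + 1 < (parts.length : Int)
        then (PySem.List.pyGet? parts (i + 1)).getD ""  -- in range because i+1 < len(parts)
        else ""
      (worker_id, run_id)
    else pvAGo parts tl

def parse_worker_run (path : String) : String × String :=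
  let norm := PySem.Str.replace path "\\" "/"
  let parts := (PySem.Str.split? norm "/").getD []  -- sep "/" is nonempty, so split never raises
  pvAGo parts (PySem.List.enumerate parts)

-- ===== PORT B =====
-- s.partition("/") on the char list: (head component, whether "/" occurs, remainder after it).
-- Exact for the single-char separator "/": the middle Bool models the truthiness of sep
-- (Python's "/" vs ""), and for a missing separator the remainder is "" as in Python.
def pvPartition (s : List Char) : List Char × Bool × List Char :=
  (s.takeWhile (· ≠ '/'),
   decide ((s.takeWhile (· ≠ '/')).length < s.length),
   s.drop ((s.takeWhile (· ≠ '/')).length + 1))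

def pvBGo (s : List Char) : String × String :=
  if PySem.Chars.startswith (pvPartition s).1 "worker_".toList then
    (String.ofList ((pvPartition s).1.drop 7),
     if (pvPartition s).2.1 then String.ofList (pvPartition (pvPartition s).2.2).1 else "")
  else if h : (pvPartition s).2.1 then pvBGo (pvPartition s).2.2
  else ("", "")
termination_by s.length
decreasing_by
  simp only [pvPartition, decide_eq_true_eq] at h
  simp only [pvPartition, List.length_drop]
  omega

def parse_worker_run_alt (path : String) : String × String :=
  pvBGo (PySem.Str.replace path "\\" "/").toList

-- ===== PRECONDITION & SPEC =====
def Spec_parse_worker_run (path : String) (out : String × String) : Prop := out = parse_worker_run_alt path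
instance (path : String) (out : String × String) : Decidable (Spec_parse_worker_run path out) := by unfold Spec_parse_worker_run; infer_instance

-- ===== CLAIM (what is proved, stated in full; the proofs are below) =====
def Claim_equal_parse_worker_run : Prop := ∀ (path : String), Dom_parse_worker_run path → Spec_parse_worker_run path (parse_worker_run path)

-- ===== LEMMAS AND PROOFS =====

-- reference splitter on '/' used to connect the two ports
def pvConsPre (p : List Char) : List (List Char) → List (List Char)
  | [] => [p]
  | h :: t => (p ++ h) :: t

def pvSplit : List Char → List (List Char)
  | [] => [[]]
  | c :: rest => if c = '/' then [] :: pvSplit rest else pvConsPre [c] (pvSplit rest)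

theorem pvSplit_ne_nil (s : List Char) : pvSplit s ≠ [] := by
  cases s with
  | nil => simp [pvSplit]
  | cons c rest =>
      simp only [pvSplit]
      split
      · simp
      · cases h : pvSplit rest <;> simp [pvConsPre]

theorem pvConsPre_nil (xs : List (List Char)) (h : xs ≠ []) : pvConsPre [] xs = xs := by
  cases xs with
  | nil => exact absurd rfl h
  | cons a t => simp [pvConsPre]

theorem pvConsPre_consPre (p q : List Char) (xs : List (List Char)) :
    pvConsPre p (pvConsPre q xs) = pvConsPre (p ++ q) xs := by
  cases xs <;> simp [pvConsPre]

theorem splitOn_go_cons (fuel : Nat) (c : Char) (rest cur : List Char) (acc : List (List Char)) :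
    PySem.Chars.splitOn.go ['/'] (fuel+1) (c::rest) cur acc
      = if c = '/' then PySem.Chars.splitOn.go ['/'] fuel rest [] (cur.reverse::acc)
        else PySem.Chars.splitOn.go ['/'] fuel rest (c::cur) acc := by
  rw [PySem.Chars.splitOn.go]
  have hpre : List.isPrefixOf ['/'] (c::rest) = ('/' == c) := by
    show ('/' == c && List.isPrefixOf [] rest) = ('/' == c); simp
  rw [hpre]
  by_cases hc : c = '/'
  · rw [if_pos (by simp [hc]), if_pos hc]; rfl
  · rw [if_neg (by simp [Ne.symm hc]), if_neg hc]

theorem splitOn_go_eq (l : List Char) : ∀ (fuel : Nat) (cur : List Char) (acc : List (List Char)),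
    l.length < fuel →
    PySem.Chars.splitOn.go ['/'] fuel l cur acc = acc.reverse ++ pvConsPre cur.reverse (pvSplit l) := by
  induction l with
  | nil =>
      intro fuel cur acc h
      match fuel with
      | fuel + 1 => simp [PySem.Chars.splitOn.go, pvSplit, pvConsPre]
  | cons c rest ih =>
      intro fuel cur acc h
      match fuel with
      | fuel + 1 =>
        rw [splitOn_go_cons]
        by_cases hc : c = '/'
        · rw [if_pos hc]
          rw [ih fuel [] (cur.reverse :: acc) (by simpa using Nat.lt_of_succ_lt_succ h)]
          rw [List.reverse_nil, pvConsPre_nil _ (pvSplit_ne_nil rest)]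
          simp [pvSplit, hc, pvConsPre]
        · rw [if_neg hc]
          rw [ih fuel (c :: cur) acc (by simpa using Nat.lt_of_succ_lt_succ h)]
          simp [pvSplit, hc, pvConsPre_consPre]

theorem splitOn_eq_pvSplit (s : List Char) : PySem.Chars.splitOn s ['/'] = pvSplit s := by
  rw [PySem.Chars.splitOn, splitOn_go_eq s (s.length + 1) [] [] (Nat.lt_succ_self _)]
  simp [pvConsPre_nil _ (pvSplit_ne_nil s)]

theorem takeWhile_cons_ne (c : Char) (rest : List Char) (hc : ¬ c = '/') :
    List.takeWhile (· ≠ '/') (c::rest) = c :: List.takeWhile (· ≠ '/') rest := by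
  simp [hc]

-- one unfolding step of pvSplit in terms of pvPartition's three fields
theorem pvSplit_step (s : List Char) :
    pvSplit s = s.takeWhile (· ≠ '/') ::
      (if (s.takeWhile (· ≠ '/')).length < s.length
       then pvSplit (s.drop ((s.takeWhile (· ≠ '/')).length + 1)) else []) := by
  induction s with
  | nil => simp [pvSplit]
  | cons c rest ih =>
      by_cases hc : c = '/'
      · subst hc
        simp [pvSplit, List.takeWhile]
      · rw [takeWhile_cons_ne c rest hc]
        simp only [pvSplit, if_neg hc, List.length_cons, List.drop_succ_cons,
          Nat.add_lt_add_iff_right, ih]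
        by_cases h2 : (rest.takeWhile (· ≠ '/')).length < rest.length <;>
          simp [pvConsPre]

-- splitting off the "worker_" prefix: part.split("_", 1)[1] is part[7:]
theorem splitMax_worker (t : List Char) :
    PySem.Chars.splitOnMax ("worker_".toList ++ t) ['_'] 1 = ["worker".toList, t] := by
  have go0 : ∀ (fuel : Nat) (l : List Char) (acc : List (List Char)),
      PySem.Chars.splitOnMax.go ['_'] fuel 0 l [] acc = (l :: acc).reverse := by
    intro fuel l acc
    match fuel, l with
    | 0, l => simp [PySem.Chars.splitOnMax.go]
    | fuel + 1, [] => simp [PySem.Chars.splitOnMax.go]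
    | fuel + 1, c :: rest => simp [PySem.Chars.splitOnMax.go]
  have hgo : ∀ (fuel : Nat), t.length + 8 ≤ fuel →
      PySem.Chars.splitOnMax.go ['_'] fuel 1 ("worker_".toList ++ t) [] [] = ["worker".toList, t] := by
    intro fuel hf
    match fuel, hf with
    | f + 8, _ =>
      simp only [PySem.Chars.splitOnMax.go, List.isPrefixOf, show "worker_".toList ++ t
        = 'w'::'o'::'r'::'k'::'e'::'r'::'_'::t by rfl]
      norm_num [go0]
      rfl
  rw [PySem.Chars.splitOnMax]
  norm_num
  refine hgo _ ?_
  have h7 : "worker_".length = 7 := rfl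
  simp only [h7]
  omega

-- the main correspondence between A's enumerate scan and B's partition stream
theorem startswith_ofList (tw : List Char) :
    PySem.Str.startswith (String.ofList tw) "worker_" = PySem.Chars.startswith tw "worker_".toList := by
  simp [PySem.Str.startswith]

theorem worker_split_of_startswith (tw : List Char)
    (hw : PySem.Chars.startswith tw "worker_".toList = true) :
    ((PySem.Str.splitMax? (String.ofList tw) "_" 1).getD []).getD 1 "" = String.ofList (tw.drop 7) := by
  have hpre : "worker_".toList <+: tw := by
    simpa [PySem.Chars.startswith, List.isPrefixOf_iff_prefix] using hw
  have htw : tw = "worker_".toList ++ tw.drop 7 := by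
    conv_lhs => rw [← List.take_append_drop 7 tw]
    have h7 : ("worker_".toList).length = 7 := rfl
    rw [← h7, ← List.prefix_iff_eq_take.mp hpre]
  rw [PySem.Str.splitMax?, String.toList_ofList, show "_".toList = ['_'] from rfl,
    PySem.Chars.splitMax?]
  rw [if_neg (by simp)]
  conv_lhs => rw [htw, splitMax_worker]
  simp

theorem main_lemma : ∀ (n : Nat) (s : List Char), s.length ≤ n → ∀ (pref : List String),
    pvAGo (pref ++ (pvSplit s).map String.ofList)
      (PySem.List.enumerate ((pvSplit s).map String.ofList) (pref.length : Int)) = pvBGo s := by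
  intro n
  induction n using Nat.strong_induction_on with
  | _ n IH =>
    intro s hs pref
    rw [pvSplit_step s, pvBGo]
    simp only [pvPartition]
    set tw := s.takeWhile (· ≠ '/') with htw
    set rest := s.drop (tw.length + 1) with hrest
    set rl := (if tw.length < s.length then pvSplit rest else []) with hrl
    rw [show PySem.List.enumerate ((tw :: rl).map String.ofList) (pref.length : Int)
        = ((pref.length : Int), String.ofList tw)
          :: PySem.List.enumerate (rl.map String.ofList) ((pref.length : Int) + 1) from rfl]
    rw [pvAGo, startswith_ofList]
    by_cases hw : PySem.Chars.startswith tw "worker_".toList = true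
    · rw [if_pos hw, if_pos hw]
      dsimp only
      refine Prod.ext ?_ ?_
      · exact worker_split_of_startswith tw hw
      · by_cases hsep : tw.length < s.length
        · simp only [hrl, if_pos hsep]
          rw [if_pos (show decide (tw.length < s.length) = true by simpa using hsep)]
          have hlen : (pref ++ (tw :: pvSplit rest).map String.ofList).length
              = pref.length + 1 + (pvSplit rest).length := by simp; omega
          rw [if_pos (show ((pref.length : Int) + 1 <
              ((pref ++ (tw :: pvSplit rest).map String.ofList).length : Int)) by
            rw [hlen]
            have hpos : 0 < (pvSplit rest).length :=
              List.length_pos_of_ne_nil (pvSplit_ne_nil rest)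
            push_cast; omega)]
          rw [show (pref.length : Int) + 1 = ((pref.length + 1 : Nat) : Int) by push_cast; ring,
            PySem.List.pyGet?_natCast]
          rw [show pref ++ (tw :: pvSplit rest).map String.ofList
              = (pref ++ [String.ofList tw]) ++ (pvSplit rest).map String.ofList by simp]
          rw [List.getElem?_append_right (by simp)]
          rw [pvSplit_step rest]
          simp
        · simp only [hrl, if_neg hsep]
          rw [if_neg (show ¬ decide (tw.length < s.length) = true by simpa using hsep)]
          rw [if_neg (show ¬ ((pref.length : Int) + 1 <
              ((pref ++ (tw :: ([] : List (List Char))).map String.ofList).length : Int)) by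
            simp)]
    · rw [if_neg hw, if_neg hw]
      by_cases hsep : tw.length < s.length
      · simp only [hrl, if_pos hsep]
        rw [dif_pos (show decide (tw.length < s.length) = true by simpa using hsep)]
        have hrlen : rest.length < n := by
          rw [hrest]; have := List.length_drop (l := s) (i := tw.length + 1)
          omega
        have h := IH rest.length hrlen rest le_rfl (pref ++ [String.ofList tw])
        simpa only [List.append_assoc, List.singleton_append, List.length_append,
          List.length_cons, List.length_nil, Nat.add_zero, Nat.cast_add, Nat.cast_one,
          List.cons_append, List.nil_append] using h
      · simp only [hrl, if_neg hsep]
        rw [dif_neg (show ¬ decide (tw.length < s.length) = true by simpa using hsep)]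
        rfl

theorem parse_worker_run_eq (path : String) : parse_worker_run path = parse_worker_run_alt path := by
  have h := main_lemma (PySem.Str.replace path "\\" "/").toList.length
    (PySem.Str.replace path "\\" "/").toList le_rfl []
  simpa [parse_worker_run, parse_worker_run_alt, PySem.Str.split?, PySem.Chars.split?,
    splitOn_eq_pvSplit, show "/".toList = ['/'] by rfl] using h

-- ===== VERDICT (by name: the statement is the Claim_ definition above) =====
theorem parse_worker_run_spec : Claim_equal_parse_worker_run := by
  intro path _
  unfold Spec_parse_worker_run
  exact parse_worker_run_eq path
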